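-- pv_equiv track=rewrite | github.com/nhhoang96/MultiCL_Slot_Induction | code/model/pm.py | build_id_dict
-- ===== SOURCE A (Python) =====
-- def build_id_dict(indexed_tokens):
-- 	id_dict={}
-- 	num_occ_dict={}
-- 	for i in range (len(indexed_tokens)):
-- 		if not (indexed_tokens[i] in id_dict):
-- 			id_dict[indexed_tokens[i]] = [i]
-- 			num_occ_dict[indexed_tokens[i]] = 1
-- 		else:
-- 			temp = id_dict[indexed_tokens[i]]
-- 			if (isinstance(temp, list)):
-- 				temp.append(i)
-- 			else:
-- 				temp = [temp]
-- 				temp.append(i)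
-- 			id_dict[indexed_tokens[i]] = temp
--
-- 			num_occ_dict[indexed_tokens[i]] += 1
-- 	return id_dict, num_occ_dict
-- ===== SOURCE B (Python) =====
-- def build_id_dict(indexed_tokens):
--     # staged: first the distinct tokens in first-occurrence order, then one
--     # scan per token for its indices and one .count per token for its count
--     order = []
--     seen = set()
--     for tok in indexed_tokens:
--         if tok not in seen:
--             seen.add(tok)
--             order.append(tok)
--     id_dict = {tok: [i for i, t in enumerate(indexed_tokens) if t == tok] for tok in order}
--     num_occ_dict = {tok: indexed_tokens.count(tok) for tok in order}
--     return id_dict, num_occ_dict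
-- ===== Notes on version B (the rewrite author's own statement) =====
-- stated objective: alternative
-- what changed: B replaces A's single pass maintaining two dicts with staged passes: it first collects the distinct tokens in first-occurrence order, then builds each token's index list by a comprehension over enumerate(indexed_tokens) and each count with list.count, never updating a dict entry in place.
import Mathlib
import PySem

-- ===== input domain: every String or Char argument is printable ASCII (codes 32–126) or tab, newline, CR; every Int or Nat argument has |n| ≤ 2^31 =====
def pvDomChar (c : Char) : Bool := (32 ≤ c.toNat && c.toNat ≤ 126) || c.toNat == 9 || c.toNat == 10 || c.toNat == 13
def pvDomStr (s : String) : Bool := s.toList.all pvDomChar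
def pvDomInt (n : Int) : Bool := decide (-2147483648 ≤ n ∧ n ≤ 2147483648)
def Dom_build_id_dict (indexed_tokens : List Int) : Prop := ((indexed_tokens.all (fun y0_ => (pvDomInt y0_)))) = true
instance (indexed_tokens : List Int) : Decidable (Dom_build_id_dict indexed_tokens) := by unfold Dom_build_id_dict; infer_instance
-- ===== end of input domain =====

-- B replaces A's single pass maintaining two dicts with staged passes: distinct tokens first, then one scan per token (objective: alternative).

-- ===== PORT A =====
-- Literal port of A: one loop over range(len(..)) maintaining BOTH dicts;
-- the `isinstance(temp, list)` test is always true (values are always lists), so its else arm is dead code.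
def build_id_dict (indexed_tokens : List Int) : (List (Int × List Int)) × (List (Int × Int)) :=
  let st := (PySem.List.pyRange 0 (PySem.List.len indexed_tokens) 1).foldl
    (fun (st : PySem.Dict Int (List Int) × PySem.Dict Int Int) i =>
      let tok := PySem.List.pyGetD indexed_tokens i 0
      if st.1.contains tok = false then
        (st.1.insert tok [i], st.2.insert tok 1)
      else
        let temp := st.1.getD tok [] ++ [i]   -- temp is a list; append i
        (st.1.insert tok temp, st.2.modify tok 0 (· + 1)))
    (PySem.Dict.empty, PySem.Dict.empty)
  (st.1.items, st.2.items)

-- ===== PORT B =====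
-- Literal port of B: seen/order loop (= PySem.Set.add fold), then per-token comprehension
-- over enumerate for the index lists and list.count for the counts.
def build_id_dict_alt (indexed_tokens : List Int) : (List (Int × List Int)) × (List (Int × Int)) :=
  let order : PySem.Set Int :=
    indexed_tokens.foldl (fun s tok => PySem.Set.add s tok) PySem.Set.empty
  let id_items := order.map (fun tok =>
    (tok, ((PySem.List.enumerate indexed_tokens).filter (fun p => p.2 == tok)).map (·.1)))
  let occ_items := order.map (fun tok => (tok, (indexed_tokens.count tok : Int)))
  (id_items, occ_items)

-- ===== PRECONDITION & SPEC =====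
def Spec_build_id_dict (indexed_tokens : List Int) (out : (List (Int × List Int)) × (List (Int × Int))) : Prop := out = build_id_dict_alt indexed_tokens
instance (indexed_tokens : List Int) (out : (List (Int × List Int)) × (List (Int × Int))) : Decidable (Spec_build_id_dict indexed_tokens out) := by unfold Spec_build_id_dict; infer_instance

-- ===== CLAIM (what is proved, stated in full; the proofs are below) =====
def Claim_equal_build_id_dict : Prop := ∀ (indexed_tokens : List Int), Dom_build_id_dict indexed_tokens → Spec_build_id_dict indexed_tokens (build_id_dict indexed_tokens)

-- ===== LEMMAS AND PROOFS =====

-- proof-side names for A's loop body and the two single-dict loop bodies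
def pvStepA (st : PySem.Dict Int (List Int) × PySem.Dict Int Int) (p : Int × Int) :
    PySem.Dict Int (List Int) × PySem.Dict Int Int :=
  if st.1.contains p.2 = false then
    (st.1.insert p.2 [p.1], st.2.insert p.2 1)
  else
    (st.1.insert p.2 (st.1.getD p.2 [] ++ [p.1]), st.2.modify p.2 0 (· + 1))

def pvStepG (d : PySem.Dict Int (List Int)) (p : Int × Int) : PySem.Dict Int (List Int) :=
  d.modify p.2 [] (· ++ [p.1])

def pvStepC (d : PySem.Dict Int Int) (p : Int × Int) : PySem.Dict Int Int :=
  d.modify p.2 0 (· + 1)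

-- A's coupled step is the product of the two independent steps, given matching key sets
lemma pvStepA_split (d1 : PySem.Dict Int (List Int)) (d2 : PySem.Dict Int Int)
    (hk : ∀ k, d1.contains k = d2.contains k) (p : Int × Int) :
    pvStepA (d1, d2) p = (pvStepG d1 p, pvStepC d2 p) := by
  by_cases hc : d1.contains p.2 = true
  · have hc2 : d2.contains p.2 = true := (hk p.2) ▸ hc
    simp only [pvStepA, pvStepG, pvStepC, hc, Bool.true_eq_false, if_false]
    rfl
  · simp only [Bool.not_eq_true] at hc
    have hc2 : d2.contains p.2 = false := (hk p.2) ▸ hc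
    simp only [pvStepA, pvStepG, pvStepC, hc, if_true]
    refine Prod.ext ?_ ?_
    · show d1.insert p.2 [p.1] = d1.insert p.2 (d1.getD p.2 [] ++ [p.1])
      rw [PySem.Dict.getD_of_not_contains d1 [] hc]; rfl
    · show d2.insert p.2 1 = d2.insert p.2 (d2.getD p.2 0 + 1)
      rw [PySem.Dict.getD_of_not_contains d2 0 hc2]; rfl

lemma pvContains_step (d1 : PySem.Dict Int (List Int)) (d2 : PySem.Dict Int Int)
    (hk : ∀ k, d1.contains k = d2.contains k) (p : Int × Int) (k : Int) :
    (pvStepG d1 p).contains k = (pvStepC d2 p).contains k := by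
  simp [pvStepG, pvStepC, PySem.Dict.contains_modify, hk k]

lemma pvFold_split (l : List (Int × Int)) (d1 : PySem.Dict Int (List Int)) (d2 : PySem.Dict Int Int)
    (hk : ∀ k, d1.contains k = d2.contains k) :
    l.foldl pvStepA (d1, d2) = (l.foldl pvStepG d1, l.foldl pvStepC d2) := by
  induction l generalizing d1 d2 with
  | nil => rfl
  | cons p l ih =>
    rw [List.foldl_cons, List.foldl_cons, pvStepA_split d1 d2 hk p]
    exact ih _ _ (pvContains_step d1 d2 hk p)

-- the count dict of A IS Counter(indexed_tokens)
lemma pvFoldC_eq_counter (ts : List Int) :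
    (PySem.List.enumerate ts).foldl pvStepC PySem.Dict.empty = PySem.Dict.counter ts := by
  rw [PySem.Dict.counter_eq_foldl]
  conv_rhs => rw [← PySem.List.map_snd_enumerate ts 0]
  rw [List.foldl_map]
  rfl

-- the grouping dict of A, described entry by entry
lemma pvFoldG_items (ts : List Int) :
    ((PySem.List.enumerate ts).foldl pvStepG PySem.Dict.empty).items
      = (PySem.Set.ofList ts).map (fun tok =>
          (tok, ((PySem.List.enumerate ts).filter (fun p => p.2 == tok)).map (·.1))) := by
  set g := (PySem.List.enumerate ts).foldl pvStepG PySem.Dict.empty with hg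
  have hkeys : g.keys = PySem.Set.ofList ts := by
    rw [hg]
    show ((PySem.List.enumerate ts).foldl
        (fun d p => d.modify ((·.2) p) [] (· ++ [p.1])) PySem.Dict.empty).keys = _
    rw [PySem.Dict.keys_foldl_modify_key]
    simp [PySem.List.map_snd_enumerate, PySem.Dict.keys_empty, PySem.Set.update_nil_left]
  have hnd : g.keys.Nodup := by rw [hkeys]; exact PySem.Set.nodup_ofList ts
  have hitems := PySem.Dict.items_eq_map_keys g hnd []
  rw [hitems, hkeys]
  apply List.map_congr_left
  intro tok _
  congr 1
  -- getD of the grouping fold, via the swapped-pair form of the lemma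
  have hswap : g = ((PySem.List.enumerate ts).map (fun p => (p.2, p.1))).foldl
      (fun d q => d.modify q.1 [] (· ++ [q.2])) PySem.Dict.empty := by
    rw [hg, List.foldl_map]; rfl
  rw [hswap, PySem.Dict.getD_foldl_modify_append]
  simp [List.filter_map, List.map_map, Function.comp_def]

-- ===== VERDICT (by name: the statement is the Claim_ definition above) =====
theorem build_id_dict_spec : Claim_equal_build_id_dict := by
  intro ts _
  show build_id_dict ts = build_id_dict_alt ts
  show (let st := (PySem.List.pyRange 0 (PySem.List.len ts) 1).foldl
          (fun st i => pvStepA st (i, PySem.List.pyGetD ts i 0))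
          (PySem.Dict.empty, PySem.Dict.empty)
        (st.1.items, st.2.items))
     = build_id_dict_alt ts
  rw [show ((PySem.List.pyRange 0 (PySem.List.len ts) 1).foldl
          (fun st i => pvStepA st (i, PySem.List.pyGetD ts i 0))
          (PySem.Dict.empty, PySem.Dict.empty))
        = (PySem.List.enumerate ts).foldl pvStepA (PySem.Dict.empty, PySem.Dict.empty) by
      rw [PySem.List.enumerate_eq_map_pyRange ts 0, List.foldl_map]]
  rw [pvFold_split _ _ _ (by intro k; rfl)]
  show ((((PySem.List.enumerate ts).foldl pvStepG PySem.Dict.empty)).items,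
        (((PySem.List.enumerate ts).foldl pvStepC PySem.Dict.empty)).items)
     = build_id_dict_alt ts
  rw [pvFoldG_items, pvFoldC_eq_counter, PySem.Dict.items_counter]
  show _ = (let order := ts.foldl (fun s tok => PySem.Set.add s tok) PySem.Set.empty
            (order.map _, order.map _))
  rw [show ts.foldl (fun s tok => PySem.Set.add s tok) PySem.Set.empty = PySem.Set.ofList ts from
      (PySem.Set.ofList_eq_foldl ts).symm]
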